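-- pv_equiv track=rewrite | github.com/JulianAFO98/Python-Uni | Guia_3/codigos_ins_sin_uni.py | es_univoco
-- ===== SOURCE A (Python) =====
-- def es_univoco(codigo):
--     es_univoco = True
--     codigo_set = set(codigo)
--     sufijos_a_revisar = codigo_set.copy()
--
--     while es_univoco and sufijos_a_revisar:
--         nuevos_sufijos = set()
--
--         for x in sufijos_a_revisar:
--             for y in codigo_set:
--                 if y.startswith(x) and y != x:
--                     suf = y[len(x):]
--                     if suf in codigo_set:
--                         es_univoco = False
--                     nuevos_sufijos.add(suf)
--
--         if es_univoco:
--             sufijos_a_revisar = nuevos_sufijos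
--         else:
--             sufijos_a_revisar = set()
--
--     return es_univoco
-- ===== SOURCE B (Python) =====
-- def es_univoco(codigo):
--     codigo_set = set(codigo)
--     # index built once: every proper prefix of a codeword -> the tails it leaves
--     pares = [(y[:i], y[i:]) for y in codigo_set for i in range(len(y))]
--     tails = {}
--     for p, t in pares:
--         tails.setdefault(p, []).append(t)
--     es_uni = True
--     sufijos = set(codigo_set)
--     while es_uni and sufijos:
--         nuevos = set()
--         for x in sufijos:
--             for t in tails.get(x, ()):
--                 if t in codigo_set:
--                     es_uni = False
--                 nuevos.add(t)
--         sufijos = nuevos if es_uni else set()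
--     return es_uni
-- ===== Notes on version B (the rewrite author's own statement) =====
-- stated objective: faster
-- what changed: B builds a prefix-to-tails index (every proper prefix of a codeword mapped to the tails it leaves) once up front, so each round of the Sardinas-Patterson-style loop replaces A's inner scan of all codewords with startswith tests by a single dictionary lookup per pending suffix.
import Mathlib
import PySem

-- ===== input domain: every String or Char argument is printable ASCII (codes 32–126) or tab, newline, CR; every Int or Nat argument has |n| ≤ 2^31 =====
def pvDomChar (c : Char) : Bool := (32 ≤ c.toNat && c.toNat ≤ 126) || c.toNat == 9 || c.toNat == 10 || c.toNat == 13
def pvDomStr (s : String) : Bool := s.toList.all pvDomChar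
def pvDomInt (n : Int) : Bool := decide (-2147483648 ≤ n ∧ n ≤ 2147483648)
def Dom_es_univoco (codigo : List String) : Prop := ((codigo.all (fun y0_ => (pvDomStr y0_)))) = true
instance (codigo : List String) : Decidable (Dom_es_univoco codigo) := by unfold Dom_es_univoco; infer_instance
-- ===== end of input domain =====

-- B builds a prefix→tails index of the code once, replacing A's per-round scan of all
-- codewords with startswith tests by a single lookup per suffix (return value unchanged).

-- fuel: an upper bound on the number of rounds A's while-loop performs on every input on
-- which it terminates; a totality device only, the same expression in both ports.
def pvFuel (codigo : List String) : Nat :=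
  codigo.foldl (fun n y => n + (PySem.Str.len y).toNat) 0 + codigo.length + 2

-- ===== PORT A =====
def esLoopA (cset : PySem.Set String) : Nat → PySem.Set String → Bool
  | 0, _ => true
  | Nat.succ n, sufijos =>
    if sufijos.isEmpty then true
    else
      let st := sufijos.foldl (fun st x =>
        cset.foldl (fun st y =>
          if PySem.Str.startswith y x && !(y == x) then
            let suf := PySem.Str.slice y (some (PySem.Str.len x)) none
            ((if PySem.Set.contains cset suf then false else st.1), PySem.Set.add st.2 suf)
          else st) st) (true, (PySem.Set.empty : PySem.Set String))
      if st.1 then esLoopA cset n st.2 else false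

def es_univoco (codigo : List String) : Bool :=
  let cset := PySem.Set.ofList codigo
  esLoopA cset (pvFuel codigo) cset

-- ===== PORT B =====
def esLoopB (cset : PySem.Set String) (tails : PySem.Dict String (List String)) :
    Nat → PySem.Set String → Bool
  | 0, _ => true
  | Nat.succ n, sufijos =>
    if sufijos.isEmpty then true
    else
      let st := sufijos.foldl (fun st x =>
        (tails.getD x []).foldl (fun st t =>
          ((if PySem.Set.contains cset t then false else st.1), PySem.Set.add st.2 t)) st)
        (true, (PySem.Set.empty : PySem.Set String))
      if st.1 then esLoopB cset tails n st.2 else false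

def es_univoco_alt (codigo : List String) : Bool :=
  let cset := PySem.Set.ofList codigo
  let pares := cset.flatMap (fun y =>
    (PySem.List.pyRange 0 (PySem.Str.len y) 1).map (fun i =>
      (PySem.Str.slice y none (some i), PySem.Str.slice y (some i) none)))
  let tails := pares.foldl (fun d p => d.modify p.1 [] (· ++ [p.2])) PySem.Dict.empty
  esLoopB cset tails (pvFuel codigo) cset

-- ===== PRECONDITION & SPEC =====
-- helpers for Pre_: the tail graph of the code (an edge u → y[len(u):] for every codeword y
-- having u as a proper prefix) and its transitive closure, by bounded composition.
def pvNodes (codigo : List String) : List String :=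
  PySem.Set.ofList (codigo ++ codigo.flatMap (fun y =>
    (List.range y.toList.length).map (fun i => String.ofList (y.toList.drop i))))

def pvEdges (codigo : List String) : List (String × String) :=
  (pvNodes codigo).flatMap (fun u => (PySem.Set.ofList codigo).filterMap (fun y =>
    if u.toList.isPrefixOf y.toList && !(u == y) then
      some (u, String.ofList (y.toList.drop u.toList.length)) else none))

def pvClosure (codigo : List String) : List (String × String) :=
  let E := pvEdges codigo
  (List.range ((pvNodes codigo).length + 1)).foldl
    (fun R _ => PySem.Set.update R (R.flatMap (fun p =>
      E.filterMap (fun q => if p.2 == q.1 then some (p.1, q.2) else none)))) (PySem.Set.ofList E)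

-- Pre_ excludes exactly the inputs on which Python A never returns: its while-loop diverges
-- iff no produced suffix is ever a codeword AND the tail graph has a cycle reachable from a
-- codeword; Pre_ states the complement of that condition on the input's tail graph.
def Pre_es_univoco (codigo : List String) : Prop :=
  (∃ p ∈ pvClosure codigo, p.1 ∈ PySem.Set.ofList codigo ∧ p.2 ∈ PySem.Set.ofList codigo) ∨
  (∀ p ∈ pvClosure codigo, p.1 = p.2 →
    p.1 ∉ PySem.Set.ofList codigo ∧
    ∀ c ∈ PySem.Set.ofList codigo, (c, p.1) ∉ pvClosure codigo)
instance (codigo : List String) : Decidable (Pre_es_univoco codigo) := by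
  unfold Pre_es_univoco; infer_instance

def pvWitness_es_univoco : List String := ["0", "01"]

def Spec_es_univoco (codigo : List String) (out : Bool) : Prop := out = es_univoco_alt codigo
instance (codigo : List String) (out : Bool) : Decidable (Spec_es_univoco codigo out) := by
  unfold Spec_es_univoco; infer_instance

-- ===== CLAIM (what is proved, stated in full; the proofs are below) =====
def Claim_equal_es_univoco : Prop := ∀ (codigo : List String), Dom_es_univoco codigo → Pre_es_univoco codigo → Spec_es_univoco codigo (es_univoco codigo)

-- ===== LEMMAS AND PROOFS =====

-- among the first n indices of ly, exactly one take can equal lx (its own length)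
theorem pv_range_filter (ly lx : List Char) :
    ∀ n, n ≤ ly.length →
      (List.range n).filter (fun k => ly.take k = lx) =
        if lx.length < n ∧ ly.take lx.length = lx then [lx.length] else [] := by
  intro n
  induction n with
  | zero => intro _; simp
  | succ n ih =>
    intro h
    rw [List.range_succ, List.filter_append]
    rw [ih (by omega)]
    have hn : n < ly.length := by omega
    have hdec : (ly.take n = lx) ↔ (n = lx.length ∧ ly.take lx.length = lx) := by
      constructor
      · intro he
        have : n = lx.length := by
          have := congrArg List.length he
          simpa [Nat.min_eq_left (le_of_lt hn)] using this
        exact ⟨this, by rw [← this]; exact he⟩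
      · rintro ⟨h1, h2⟩; rw [h1]; exact h2
    by_cases hx : ly.take lx.length = lx
    · by_cases hlt : lx.length < n
      · have : ¬ (ly.take n = lx) := by rw [hdec]; omega
        simp [hx, hlt, this, show lx.length < n + 1 by omega]
      · by_cases heq : n = lx.length
        · simp [hx, heq]
        · have hnn : ¬ (ly.take n = lx) := by rw [hdec]; tauto
          simp [hx, hlt, hnn, show ¬ lx.length < n + 1 by omega]
    · have hnn : ¬ (ly.take n = lx) := by rw [hdec]; tauto
      simp [hx, hnn]

-- one codeword's contribution to the index at key x is exactly A's startswith test on it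
theorem pv_per_y (y x : String) :
    (((PySem.List.pyRange 0 (PySem.Str.len y) 1).map (fun i =>
        (PySem.Str.slice y none (some i), PySem.Str.slice y (some i) none))).filter
        (fun p => p.1 == x)).map (fun p => p.2)
    = if PySem.Str.startswith y x && !(y == x) then
        [PySem.Str.slice y (some (PySem.Str.len x)) none] else [] := by
  rw [PySem.List.pyRange_one]
  simp only [PySem.Str.len_eq, Int.sub_zero, Int.toNat_natCast]
  rw [List.map_map, List.filter_map, List.map_map]
  have hpred : ∀ k ∈ List.range y.toList.length,
      ((fun p => p.1 == x) ∘ ((fun i => (PySem.Str.slice y none (some i), PySem.Str.slice y (some i) none)) ∘ fun k : Nat => (0:Int) + k)) k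
      = (fun k => decide (y.toList.take k = x.toList)) k := by
    intro k hk
    show (PySem.Str.slice y none (some ((0:Int) + ↑k)) == x) = _
    rw [Bool.eq_iff_iff, beq_iff_eq, decide_eq_true_iff, String.ext_iff]
    simp [PySem.List.slice_to_natCast]
  rw [List.filter_congr hpred]
  rw [pv_range_filter y.toList x.toList y.toList.length (le_refl _)]
  by_cases hc : x.toList.length < y.toList.length ∧ y.toList.take x.toList.length = x.toList
  · rw [if_pos hc]
    have hsw : (PySem.Str.startswith y x && !(y == x)) = true := by
      simp only [PySem.Str.startswith_eq, Bool.and_eq_true, Bool.not_eq_eq_eq_not, Bool.not_true,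
        beq_eq_false_iff_ne, ne_eq]
      constructor
      · rw [PySem.Chars.startswith_iff, List.prefix_iff_eq_take]
        exact hc.2.symm
      · intro he; subst he; omega
    rw [if_pos hsw]
    simp
  · rw [if_neg hc]
    have hsw : ¬ (PySem.Str.startswith y x && !(y == x)) = true := by
      simp only [PySem.Str.startswith_eq, Bool.and_eq_true, Bool.not_eq_eq_eq_not, Bool.not_true,
        beq_eq_false_iff_ne, ne_eq]
      rintro ⟨h1, h2⟩
      rw [PySem.Chars.startswith_iff] at h1
      apply hc
      constructor
      · rcases List.IsPrefix.length_le h1 |>.lt_or_eq with h | h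
        · exact h
        · exact absurd (String.ext_iff.mpr (h1.eq_of_length h).symm) h2
      · exact (List.prefix_iff_eq_take.mp h1).symm
    rw [if_neg hsw]
    simp

-- filter-then-map as a flatMap of conditional singletons
theorem pv_filter_map_eq_flatMap {α β : Type} (p : α → Bool) (h : α → β) :
    ∀ (l : List α), (l.filter p).map h = l.flatMap (fun y => if p y then [h y] else []) := by
  intro l
  induction l with
  | nil => rfl
  | cons a l ih =>
    by_cases hp : p a = true
    · simp [hp, ih]
    · simp only [Bool.not_eq_true] at hp
      simp [hp, ih]

-- the prefix→tails index yields, at each key x, exactly the tails A's inner scan produces, in order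
theorem pv_tails_getD (cset : PySem.Set String) (x : String) :
    ((cset.flatMap (fun y =>
        (PySem.List.pyRange 0 (PySem.Str.len y) 1).map (fun i =>
          (PySem.Str.slice y none (some i), PySem.Str.slice y (some i) none)))).foldl
      (fun d p => d.modify p.1 [] (· ++ [p.2])) PySem.Dict.empty).getD x []
    = (cset.filter (fun y => PySem.Str.startswith y x && !(y == x))).map
        (fun y => PySem.Str.slice y (some (PySem.Str.len x)) none) := by
  rw [PySem.Dict.getD_foldl_modify_append]
  rw [List.filter_flatMap, List.map_flatMap]
  have : ∀ y : String,
      ((((PySem.List.pyRange 0 (PySem.Str.len y) 1).map (fun i =>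
        (PySem.Str.slice y none (some i), PySem.Str.slice y (some i) none))).filter
        (fun p => p.1 == x)).map (fun p => p.2))
      = (fun y => if (fun y => PySem.Str.startswith y x && !(y == x)) y then
          [(fun y => PySem.Str.slice y (some (PySem.Str.len x)) none) y] else []) y := by
    intro y; exact pv_per_y y x
  simp only [this]
  rw [pv_filter_map_eq_flatMap]
  simp

-- a fold that conditionally consumes h y is a fold over the filtered-and-mapped list
theorem pv_foldl_filter_map {α β σ : Type} (p : α → Bool) (h : α → β) (g : σ → β → σ) :
    ∀ (l : List α) (st : σ),
      l.foldl (fun st y => if p y then g st (h y) else st) st = ((l.filter p).map h).foldl g st := by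
  intro l
  induction l with
  | nil => intro st; rfl
  | cons a l ih =>
    intro st
    by_cases hp : p a = true
    · simp [hp, ih]
    · simp only [Bool.not_eq_true] at hp
      simp [hp, ih]

-- the two loops agree round for round (same flag, same suffix list)
theorem pv_loop_eq (cset : PySem.Set String) :
    ∀ (n : Nat) (S : PySem.Set String),
      esLoopA cset n S
      = esLoopB cset
          ((cset.flatMap (fun y =>
              (PySem.List.pyRange 0 (PySem.Str.len y) 1).map (fun i =>
                (PySem.Str.slice y none (some i), PySem.Str.slice y (some i) none)))).foldl
            (fun d p => d.modify p.1 [] (· ++ [p.2])) PySem.Dict.empty) n S := by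
  intro n
  induction n with
  | zero => intro S; rfl
  | succ n ih =>
    intro S
    rw [esLoopA, esLoopB]
    have hinner : ∀ (st : Bool × PySem.Set String) (x : String),
        cset.foldl (fun st y =>
          if PySem.Str.startswith y x && !(y == x) then
            ((if PySem.Set.contains cset (PySem.Str.slice y (some (PySem.Str.len x)) none) then false else st.1),
              PySem.Set.add st.2 (PySem.Str.slice y (some (PySem.Str.len x)) none))
          else st) st
        = (((cset.flatMap (fun y =>
              (PySem.List.pyRange 0 (PySem.Str.len y) 1).map (fun i =>
                (PySem.Str.slice y none (some i), PySem.Str.slice y (some i) none)))).foldl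
            (fun d p => d.modify p.1 [] (· ++ [p.2])) PySem.Dict.empty).getD x []).foldl
            (fun st t => ((if PySem.Set.contains cset t then false else st.1), PySem.Set.add st.2 t)) st := by
      intro st x
      rw [pv_tails_getD]
      exact pv_foldl_filter_map (fun y => PySem.Str.startswith y x && !(y == x))
        (fun y => PySem.Str.slice y (some (PySem.Str.len x)) none)
        (fun st t => ((if PySem.Set.contains cset t then false else st.1), PySem.Set.add st.2 t)) cset st
    simp only [hinner, ih]

-- ===== VERDICT (by name: the statement is the Claim_ definition above) =====
theorem es_univoco_spec : Claim_equal_es_univoco := by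
  intro codigo _ _
  unfold Spec_es_univoco es_univoco es_univoco_alt
  exact pv_loop_eq (PySem.Set.ofList codigo) (pvFuel codigo) (PySem.Set.ofList codigo)
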